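-- pv_equiv track=rewrite | github.com/rdevitto86/komodo-ecom | apis/komodo-ai-guardrails-api/utils/sanitization.py | filter_personality_deviation
-- ===== SOURCE A (Python) =====
-- _PERSONA_PHRASES: list[str] = [
--     "pretend you are",
--     "pretend to be",
--     "roleplay as",
--     "role play as",
--     "role-play as",
--     "act as if you are",
--     "act as if you were",
--     "simulate being",
--     "simulate a",
--     "you are now",
--     "you must now be",
--     "from now on you are",
--     "from now on, you are",
--     "from now on you will act",
--     "take on the persona",
--     "adopt the persona",
--     "new persona",
--     "forget you are",
--     "forget that you are",
--     "your true self",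
--     "your real self",
-- ]
--
-- _JAILBREAK_PHRASES: list[str] = [
--     "jailbreak",
--     "developer mode",
--     "god mode",
--     "unrestricted mode",
--     "dan mode",
--     "do anything now",
--     "unlock your",
--     "no restrictions",
--     "without restrictions",
--     "ignore your training",
--     "ignore your guidelines",
--     "ignore your rules",
--     "bypass your",
-- ]
--
-- def filter_personality_deviation(text: str) -> tuple[str, list[str]]:
--     """Detect attempts to override the model's persona or unlock unrestricted
--     behaviour.
--
--     Returns (text, flags) — text is unchanged.
--     """
--     flags: list[str] = []
--     lower = text.lower()
--
--     if any(phrase in lower for phrase in _PERSONA_PHRASES):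
--         flags.append("deviation.persona_override")
--
--     if any(phrase in lower for phrase in _JAILBREAK_PHRASES):
--         flags.append("deviation.jailbreak")
--
--     return text, flags
-- ===== SOURCE B (Python) =====
-- _PERSONA_PHRASES: list[str] = [
--     "pretend you are",
--     "pretend to be",
--     "roleplay as",
--     "role play as",
--     "role-play as",
--     "act as if you are",
--     "act as if you were",
--     "simulate being",
--     "simulate a",
--     "you are now",
--     "you must now be",
--     "from now on you are",
--     "from now on, you are",
--     "from now on you will act",
--     "take on the persona",
--     "adopt the persona",
--     "new persona",
--     "forget you are",
--     "forget that you are",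
--     "your true self",
--     "your real self",
-- ]
--
-- _JAILBREAK_PHRASES: list[str] = [
--     "jailbreak",
--     "developer mode",
--     "god mode",
--     "unrestricted mode",
--     "dan mode",
--     "do anything now",
--     "unlock your",
--     "no restrictions",
--     "without restrictions",
--     "ignore your training",
--     "ignore your guidelines",
--     "ignore your rules",
--     "bypass your",
-- ]
--
--
-- def filter_personality_deviation(text: str) -> tuple[str, list[str]]:
--     """Single left-to-right scan: at each position test whether some phrase of
--     either category starts there; stop early once both categories were seen."""
--     lower = text.lower()
--     persona = jailbreak = False
--     for i in range(len(lower)):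
--         if persona and jailbreak:
--             break
--         if not persona and any(lower.startswith(p, i) for p in _PERSONA_PHRASES):
--             persona = True
--         if not jailbreak and any(lower.startswith(p, i) for p in _JAILBREAK_PHRASES):
--             jailbreak = True
--     flags = ([] if not persona else ["deviation.persona_override"]) + \
--             ([] if not jailbreak else ["deviation.jailbreak"])
--     return text, flags
-- ===== Notes on version B (the rewrite author's own statement) =====
-- stated objective: alternative
-- what changed: Instead of running a separate full substring scan of the text for each of the 34 phrases (two any(phrase in lower) passes), B lowercases once and makes a single left-to-right scan over positions, testing at each position which category has a phrase starting there, with an early break once both flags are set.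
import Mathlib
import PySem

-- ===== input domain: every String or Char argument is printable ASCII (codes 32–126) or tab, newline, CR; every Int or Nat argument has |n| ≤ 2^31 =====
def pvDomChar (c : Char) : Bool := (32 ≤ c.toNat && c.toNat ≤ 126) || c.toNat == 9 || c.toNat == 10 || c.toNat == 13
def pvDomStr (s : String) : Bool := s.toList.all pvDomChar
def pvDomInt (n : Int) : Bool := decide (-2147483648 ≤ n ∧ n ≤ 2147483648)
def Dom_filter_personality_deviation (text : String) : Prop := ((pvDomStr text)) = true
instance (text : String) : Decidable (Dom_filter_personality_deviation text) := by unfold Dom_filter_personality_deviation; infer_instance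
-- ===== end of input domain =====

-- B replaces the per-phrase substring scans by one left-to-right positional scan with early exit (objective: alternative; return value unchanged).

-- ===== PORT A =====
-- module-level phrase constants (shared by both versions, as in the Python module)
def pvPersonaPhrases : List String :=
  ["pretend you are", "pretend to be", "roleplay as", "role play as", "role-play as",
   "act as if you are", "act as if you were", "simulate being", "simulate a",
   "you are now", "you must now be", "from now on you are", "from now on, you are",
   "from now on you will act", "take on the persona", "adopt the persona",
   "new persona", "forget you are", "forget that you are", "your true self",
   "your real self"]

def pvJailbreakPhrases : List String :=
  ["jailbreak", "developer mode", "god mode", "unrestricted mode", "dan mode",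
   "do anything now", "unlock your", "no restrictions", "without restrictions",
   "ignore your training", "ignore your guidelines", "ignore your rules",
   "bypass your"]

def filter_personality_deviation (text : String) : String × List String :=
  let flags : List String := []
  let lower := PySem.Str.lower text
  let flags := if pvPersonaPhrases.any (fun phrase => PySem.Str.isIn phrase lower)
               then flags ++ ["deviation.persona_override"] else flags
  let flags := if pvJailbreakPhrases.any (fun phrase => PySem.Str.isIn phrase lower)
               then flags ++ ["deviation.jailbreak"] else flags
  (text, flags)

-- ===== PORT B =====
-- the phrase lists as char lists (Source B tests them with str.startswith at an offset)
def pvPersonaChars : List (List Char) := pvPersonaPhrases.map String.toList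
def pvJailbreakChars : List (List Char) := pvJailbreakPhrases.map String.toList

-- Source B's `for i in range(len(lower))` loop: the suffix `s` is lower[i:]; early break when both found
def pvScan : List Char → Bool → Bool → Bool × Bool
  | [], persona, jailbreak => (persona, jailbreak)
  | c :: rest, persona, jailbreak =>
    if persona && jailbreak then (persona, jailbreak)
    else
      let persona := if !persona && pvPersonaChars.any (fun p => PySem.Chars.startswith (c :: rest) p) then true else persona
      let jailbreak := if !jailbreak && pvJailbreakChars.any (fun p => PySem.Chars.startswith (c :: rest) p) then true else jailbreak
      pvScan rest persona jailbreak

def filter_personality_deviation_alt (text : String) : String × List String :=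
  let lower := PySem.Str.lower text
  let (persona, jailbreak) := pvScan lower.toList false false
  let flags := (if !persona then [] else ["deviation.persona_override"]) ++
               (if !jailbreak then [] else ["deviation.jailbreak"])
  (text, flags)

-- ===== PRECONDITION & SPEC =====
def Spec_filter_personality_deviation (text : String) (out : String × List String) : Prop := out = filter_personality_deviation_alt text
instance (text : String) (out : String × List String) : Decidable (Spec_filter_personality_deviation text out) := by unfold Spec_filter_personality_deviation; infer_instance

-- ===== CLAIM (what is proved, stated in full; the proofs are below) =====
def Claim_equal_filter_personality_deviation : Prop := ∀ (text : String), Dom_filter_personality_deviation text → Spec_filter_personality_deviation text (filter_personality_deviation text)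

-- ===== LEMMAS AND PROOFS =====

-- the scan computes exactly the two `any(phrase in lower)` tests of A
theorem pvScan_eq (s : List Char) (persona jailbreak : Bool) :
    pvScan s persona jailbreak
      = (persona || pvPersonaChars.any (fun p => PySem.Chars.isIn p s),
         jailbreak || pvJailbreakChars.any (fun p => PySem.Chars.isIn p s)) := by
  induction s generalizing persona jailbreak with
  | nil =>
    have h1 : pvPersonaChars.any (fun p => PySem.Chars.isIn p []) = false := by decide
    have h2 : pvJailbreakChars.any (fun p => PySem.Chars.isIn p []) = false := by decide
    simp [pvScan, h1, h2]
  | cons c rest ih =>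
    have hsplit : ∀ L : List (List Char),
        L.any (fun p => PySem.Chars.isIn p (c :: rest))
          = (L.any (fun p => PySem.Chars.startswith (c :: rest) p)
             || L.any (fun p => PySem.Chars.isIn p rest)) := by
      intro L
      rw [Bool.eq_iff_iff]
      simp only [List.any_eq_true, Bool.or_eq_true, PySem.Chars.isIn_iff_infix,
        PySem.Chars.startswith_iff, List.infix_cons_iff]
      constructor
      · rintro ⟨x, hx, h | h⟩
        exacts [Or.inl ⟨x, hx, h⟩, Or.inr ⟨x, hx, h⟩]
      · rintro (⟨x, hx, h⟩ | ⟨x, hx, h⟩)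
        exacts [⟨x, hx, Or.inl h⟩, ⟨x, hx, Or.inr h⟩]
    by_cases hpj : persona && jailbreak
    · rcases Bool.and_eq_true_iff.mp hpj with ⟨hp, hj⟩
      simp [pvScan, hp, hj]
    · simp only [pvScan, hpj, if_false, Bool.false_eq_true]
      rw [ih]
      rw [hsplit pvPersonaChars, hsplit pvJailbreakChars]
      cases persona <;> cases jailbreak <;>
        cases hq1 : pvPersonaChars.any (fun p => PySem.Chars.startswith (c :: rest) p) <;>
        cases hq2 : pvJailbreakChars.any (fun p => PySem.Chars.startswith (c :: rest) p) <;>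
        simp_all

-- A's per-list membership test, rewritten onto the char-list side
theorem pvAny_isIn_toList (L : List String) (s : String) :
    (L.map String.toList).any (fun p => PySem.Chars.isIn p s.toList)
      = L.any (fun phrase => PySem.Str.isIn phrase s) := by
  simp [List.any_map, PySem.Str.isIn, Function.comp_def]

-- ===== VERDICT (by name: the statement is the Claim_ definition above) =====
theorem filter_personality_deviation_spec : Claim_equal_filter_personality_deviation := by
  intro text _
  unfold Spec_filter_personality_deviation
  simp only [filter_personality_deviation, filter_personality_deviation_alt, pvScan_eq,
    Bool.false_or, pvPersonaChars, pvJailbreakChars, pvAny_isIn_toList]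
  cases h1 : pvPersonaPhrases.any (fun phrase => PySem.Str.isIn phrase (PySem.Str.lower text)) <;>
    cases h2 : pvJailbreakPhrases.any (fun phrase => PySem.Str.isIn phrase (PySem.Str.lower text)) <;>
    simp
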